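-- pv_equiv track=rewrite | github.com/ZermZhang/StudyRecord | src/LeetCode/Intersection.py | intersection_v2
-- ===== SOURCE A (Python) =====
-- from typing import List
--
-- def intersection_v2(nums1: List[int], nums2: List[int]) -> List[int]:
--     # 使用dict进行位置存储
--     # 64ms, 54.33%; 13.6MB, 9.88%
--     res = []
--     memories = {}
--
--     for num in nums1:
--         if num in memories:
--             continue
--         else:
--             memories[num] = 1
--
--     for num in nums2:
--         if num in memories and memories[num] == 1:
--             res.append(num)
--             memories[num] += 1
--         else:
--             continue
--
--     return res
-- ===== SOURCE B (Python) =====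
-- def intersection_v2(nums1, nums2):
--     # Filter-nub: repeatedly take the head of the remaining list, keep it if it
--     # is in nums1, and rewrite the remainder with every duplicate of it removed.
--     # No 'seen' structure at all; duplicates vanish because they are filtered out.
--     s1 = set(nums1)
--     res = []
--     rest = list(nums2)
--     while rest:
--         x = rest[0]
--         if x in s1:
--             res.append(x)
--         rest = [y for y in rest[1:] if y != x]
--     return res
-- ===== Notes on version B (the rewrite author's own statement) =====
-- stated objective: alternative
-- what changed: Replaces A's single pass over nums2 with a counting dict that both tests nums1-membership and suppresses duplicates by a filter-nub: a loop that takes the head of the remaining list, keeps it if it is in set(nums1), and rewrites the remainder with all copies of that head filtered out, so no seen/count structure exists at all.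
import Mathlib
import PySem

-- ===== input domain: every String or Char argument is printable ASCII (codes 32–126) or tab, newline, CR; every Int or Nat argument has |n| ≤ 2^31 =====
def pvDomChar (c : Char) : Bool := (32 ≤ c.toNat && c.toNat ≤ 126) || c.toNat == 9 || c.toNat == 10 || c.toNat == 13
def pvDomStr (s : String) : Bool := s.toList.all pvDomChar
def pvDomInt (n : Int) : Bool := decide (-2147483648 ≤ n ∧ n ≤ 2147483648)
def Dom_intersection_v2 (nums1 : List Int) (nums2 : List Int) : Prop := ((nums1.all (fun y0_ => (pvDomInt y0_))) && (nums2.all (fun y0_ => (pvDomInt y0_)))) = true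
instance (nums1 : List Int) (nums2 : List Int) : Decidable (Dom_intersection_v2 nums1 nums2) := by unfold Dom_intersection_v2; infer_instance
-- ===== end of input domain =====

-- B is a filter-nub: it repeatedly takes the head of the remaining list, keeps it if it is in
-- set(nums1), and filters every copy of it out of the remainder — no seen/count structure
-- (objective: alternative; not faster).

-- ===== PORT A =====
def intersection_v2 (nums1 : List Int) (nums2 : List Int) : List Int :=
  let memories : PySem.Dict Int Int :=
    nums1.foldl (fun m num => if m.contains num then m else m.insert num 1) PySem.Dict.empty
  let st := nums2.foldl
    (fun (st : List Int × PySem.Dict Int Int) num =>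
      if st.2.contains num && (st.2.getD num 0 == 1)
      then (st.1 ++ [num], st.2.modify num 0 (· + 1))
      else st)
    ([], memories)
  st.1

-- ===== PORT B =====
-- B's while loop: pop the head, append it to res if in s1, filter it out of the rest.
def pvAltLoop (s1 : PySem.Set Int) (res : List Int) : List Int → List Int
  | [] => res
  | x :: rest =>
      pvAltLoop s1 (if s1.contains x then res ++ [x] else res)
        (rest.filter (fun y => !(y == x)))
termination_by l => l.length
decreasing_by
  simp only [List.length_unattach, List.length_cons]
  exact Nat.lt_succ_of_le (le_trans (List.length_filter_le _ _) (by simp))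

def intersection_v2_alt (nums1 : List Int) (nums2 : List Int) : List Int :=
  let s1 : PySem.Set Int := PySem.Set.ofList nums1
  pvAltLoop s1 [] nums2

-- ===== PRECONDITION & SPEC =====
def Spec_intersection_v2 (nums1 : List Int) (nums2 : List Int) (out : List Int) : Prop := out = intersection_v2_alt nums1 nums2
instance (nums1 : List Int) (nums2 : List Int) (out : List Int) : Decidable (Spec_intersection_v2 nums1 nums2 out) := by unfold Spec_intersection_v2; infer_instance

-- ===== CLAIM (what is proved, stated in full; the proofs are below) =====
def Claim_equal_intersection_v2 : Prop := ∀ (nums1 : List Int) (nums2 : List Int), Dom_intersection_v2 nums1 nums2 → Spec_intersection_v2 nums1 nums2 (intersection_v2 nums1 nums2)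

-- ===== LEMMAS AND PROOFS =====

-- abstract first-occurrence scan used to relate the two loops
def pvGo (s : List Int) : List Int → List Int → List Int
  | [], res => res
  | x :: xs, res => if x ∈ s ∧ x ∉ res then pvGo s xs (res ++ [x]) else pvGo s xs res

-- A's first loop, pointwise
theorem pvLoop1_get? :
    ∀ (l s0 : List Int) (m : PySem.Dict Int Int),
      (∀ k, m.get? k = if k ∈ s0 then some (1 : Int) else none) →
      ∀ k, (l.foldl (fun m num => if m.contains num then m else m.insert num (1 : Int)) m).get? k
        = if k ∈ s0 ∨ k ∈ l then some 1 else none := by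
  intro l
  induction l with
  | nil => intro s0 m hm k; simpa using hm k
  | cons x xs ih =>
    intro s0 m hm k
    simp only [List.foldl_cons]
    by_cases hx : x ∈ s0
    · have hc : m.contains x = true := by
        rw [PySem.Dict.contains_eq_isSome_get?, hm x]; simp [hx]
      rw [hc]
      simp only [if_true]
      rw [ih s0 m hm k]
      have hiff : (k ∈ s0 ∨ k ∈ x :: xs) ↔ (k ∈ s0 ∨ k ∈ xs) := by
        simp only [List.mem_cons]
        constructor
        · rintro (h | rfl | h)
          · exact Or.inl h
          · exact Or.inl hx
          · exact Or.inr h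
        · tauto
      by_cases hk : k ∈ s0 ∨ k ∈ xs
      · rw [if_pos hk, if_pos (hiff.mpr hk)]
      · rw [if_neg hk, if_neg (fun h => hk (hiff.mp h))]
    · have hc : m.contains x = false := by
        rw [PySem.Dict.contains_eq_isSome_get?, hm x]; simp [hx]
      rw [hc]
      simp only [Bool.false_eq_true, if_false]
      have hm' : ∀ k, (m.insert x 1).get? k = if k ∈ s0 ++ [x] then some (1 : Int) else none := by
        intro k
        rw [PySem.Dict.get?_insert, hm k]
        by_cases hkx : k = x <;> simp [hkx]
      rw [ih (s0 ++ [x]) (m.insert x 1) hm' k]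
      have hiff : (k ∈ s0 ++ [x] ∨ k ∈ xs) ↔ (k ∈ s0 ∨ k ∈ x :: xs) := by
        simp only [List.mem_append, List.mem_cons]
        tauto
      by_cases hk : k ∈ s0 ++ [x] ∨ k ∈ xs
      · rw [if_pos hk, if_pos (hiff.mp hk)]
      · rw [if_neg hk, if_neg (fun h => hk (hiff.mpr h))]

-- A's second loop equals the abstract scan
theorem pvLoop2_eq (nums1 : List Int) :
    ∀ (l res : List Int) (m : PySem.Dict Int Int),
      (∀ k, m.contains k = decide (k ∈ nums1)) →
      (∀ k, m.getD k 0 = if k ∈ nums1 then (if k ∈ res then (2 : Int) else 1) else 0) →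
      (l.foldl
        (fun (st : List Int × PySem.Dict Int Int) num =>
          if st.2.contains num && (st.2.getD num 0 == 1)
          then (st.1 ++ [num], st.2.modify num 0 (· + 1))
          else st)
        (res, m)).1 = pvGo nums1 l res := by
  intro l
  induction l with
  | nil => intro res m _ _; simp [pvGo]
  | cons x xs ih =>
    intro res m hc hg
    simp only [List.foldl_cons, pvGo]
    by_cases hcond : x ∈ nums1 ∧ x ∉ res
    · have hb : (m.contains x && (m.getD x 0 == 1)) = true := by
        rw [hc x, hg x]; simp [hcond.1, hcond.2]
      rw [hb]
      simp only [if_true]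
      rw [if_pos hcond]
      apply ih (res ++ [x]) (m.modify x 0 (· + 1))
      · intro k
        rw [PySem.Dict.contains_modify, hc k]
        by_cases hkx : k = x
        · subst hkx; simp [hcond.1]
        · simp [hkx]
      · intro k
        rw [PySem.Dict.getD_modify, hg k]
        by_cases hkx : k = x
        · subst hkx; simp [hg, hcond.1, hcond.2]
        · simp [hkx, List.mem_append]
    · have hb : (m.contains x && (m.getD x 0 == 1)) = false := by
        rw [hc x, hg x]
        by_cases h1 : x ∈ nums1
        · have h2 : x ∈ res := by
            by_contra h2; exact hcond ⟨h1, h2⟩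
          simp [h1, h2]
        · simp [h1]
      rw [hb]
      simp only [Bool.false_eq_true, if_false]
      rw [if_neg hcond]
      exact ih res m hc hg

-- the abstract scan equals B's filter-nub loop, via an exclusion list P:
-- every member of P is either already emitted or not in nums1, and everything emitted is in P.
theorem pvGo_eq_altLoop (nums1 : List Int) :
    ∀ (l res P : List Int),
      (∀ y, y ∈ P → y ∈ res ∨ y ∉ nums1) →
      (∀ y, y ∈ res → y ∈ P) →
      pvGo nums1 l res
        = pvAltLoop (PySem.Set.ofList nums1) res (l.filter (fun y => decide (y ∉ P))) := by
  intro l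
  induction l with
  | nil =>
    intro res P _ _
    simp only [List.filter_nil, pvGo]
    rw [pvAltLoop]
  | cons x xs ih =>
    intro res P hP hres
    have hcont : (PySem.Set.ofList nums1).contains x = decide (x ∈ nums1) := by
      simp [PySem.Set.contains_eq_listContains, PySem.Set.mem_ofList]
    by_cases hxP : x ∈ P
    · -- x is excluded: dropped by the filter; pvGo also skips it
      have hfit : (x :: xs).filter (fun y => decide (y ∉ P)) = xs.filter (fun y => decide (y ∉ P)) := by
        simp [hxP]
      have hcond : ¬ (x ∈ nums1 ∧ x ∉ res) := by
        rcases hP x hxP with h | h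
        · exact fun hc => hc.2 h
        · exact fun hc => h hc.1
      rw [hfit]
      simp only [pvGo, if_neg hcond]
      exact ih res P hP hres
    · have hfit : (x :: xs).filter (fun y => decide (y ∉ P)) = x :: xs.filter (fun y => decide (y ∉ P)) := by
        simp [hxP]
      have hxres : x ∉ res := fun h => hxP (hres x h)
      rw [hfit]
      by_cases hxs : x ∈ nums1
      · -- emitted on both sides
        have h1 : pvGo nums1 (x :: xs) res = pvGo nums1 xs (res ++ [x]) := by
          simp [pvGo, hxs, hxres]
        have h2 : pvAltLoop (PySem.Set.ofList nums1) res (x :: xs.filter (fun y => decide (y ∉ P)))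
            = pvAltLoop (PySem.Set.ofList nums1) (res ++ [x]) (xs.filter (fun y => decide (y ∉ x :: P))) := by
          rw [pvAltLoop, hcont]
          simp only [hxs, decide_true, if_true, List.filter_filter]
          congr 1
          apply List.filter_congr
          intro y _
          by_cases hyx : y = x <;> simp [hyx]
        rw [h1, h2]
        apply ih (res ++ [x]) (x :: P)
        · intro y hy
          rcases List.mem_cons.mp hy with rfl | hy
          · exact Or.inl (by simp)
          · rcases hP y hy with h | h
            · exact Or.inl (by simp [h])
            · exact Or.inr h
        · intro y hy
          rcases List.mem_append.mp hy with h | h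
          · exact List.mem_cons_of_mem _ (hres y h)
          · simp at h; simp [h]
      · -- not in nums1: pvGo skips; altLoop tests contains=false, filters it away
        have h1 : pvGo nums1 (x :: xs) res = pvGo nums1 xs res := by
          simp [pvGo, hxs]
        have h2 : pvAltLoop (PySem.Set.ofList nums1) res (x :: xs.filter (fun y => decide (y ∉ P)))
            = pvAltLoop (PySem.Set.ofList nums1) res (xs.filter (fun y => decide (y ∉ x :: P))) := by
          rw [pvAltLoop, hcont]
          simp only [hxs, decide_false, Bool.false_eq_true, if_false, List.filter_filter]
          congr 1
          apply List.filter_congr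
          intro y _
          by_cases hyx : y = x <;> simp [hyx]
        rw [h1, h2]
        apply ih res (x :: P)
        · intro y hy
          rcases List.mem_cons.mp hy with rfl | hy
          · exact Or.inr hxs
          · exact hP y hy
        · intro y hy
          exact List.mem_cons_of_mem _ (hres y hy)

-- ===== VERDICT (by name: the statement is the Claim_ definition above) =====
theorem intersection_v2_spec : Claim_equal_intersection_v2 := by
  intro nums1 nums2 _
  unfold Spec_intersection_v2
  show intersection_v2 nums1 nums2 = intersection_v2_alt nums1 nums2
  simp only [intersection_v2, intersection_v2_alt]
  have hget : ∀ k, (nums1.foldl (fun m num => if m.contains num then m else m.insert num (1 : Int))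
      (PySem.Dict.empty : PySem.Dict Int Int)).get? k = if k ∈ nums1 then some (1 : Int) else none := by
    intro k
    have h := pvLoop1_get? nums1 [] (PySem.Dict.empty : PySem.Dict Int Int)
      (fun k => by simp [PySem.Dict.get?_empty]) k
    simpa using h
  have hc : ∀ k, (nums1.foldl (fun m num => if m.contains num then m else m.insert num (1 : Int))
      (PySem.Dict.empty : PySem.Dict Int Int)).contains k = decide (k ∈ nums1) := by
    intro k
    rw [PySem.Dict.contains_eq_isSome_get?, hget k]
    by_cases h : k ∈ nums1 <;> simp [h]
  have hg : ∀ k, (nums1.foldl (fun m num => if m.contains num then m else m.insert num (1 : Int))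
      (PySem.Dict.empty : PySem.Dict Int Int)).getD k 0
      = if k ∈ nums1 then (if k ∈ ([] : List Int) then (2 : Int) else 1) else 0 := by
    intro k
    rw [PySem.Dict.getD_eq_get?_getD, hget k]
    by_cases h : k ∈ nums1 <;> simp [h]
  rw [pvLoop2_eq nums1 nums2 [] _ hc hg]
  have h := pvGo_eq_altLoop nums1 nums2 [] [] (by simp) (by simp)
  simpa using h
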